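-- pv_equiv track=rewrite | github.com/StivenMetaj/DDM_MUSCIMA_Project | maskrcnn-benchmark/tools/evaluate_and_plot.py | sequencesDistance
-- ===== SOURCE A (Python) =====
-- cache = {}
--
-- def sequencesDistance(trueSeq, predSeq):
--     if len(trueSeq) < len(predSeq):
--         trueSeq, predSeq = predSeq, trueSeq
--
--     seqsStr = str(trueSeq) + str(predSeq)
--     if seqsStr in cache:
--         return cache[seqsStr]
--
--     if len(predSeq) == 0:
--         cache[seqsStr] = len([label for instant in trueSeq for label in instant])
--         return cache[seqsStr]
--
--     t = set(trueSeq[-1])  # insieme delle note nell'ultimo istante del groundtruth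
--     p = set(predSeq[-1])  # insieme delle note nell'ultimo istante della predizione
--     cost = len(t - p) + len(p - t)  # numero di elementi per cui i due insiemi differiscono
--
--     # ricorsione edit-distance
--     cache[seqsStr] = min([sequencesDistance(trueSeq[:-1], predSeq) + len(t),
--                           sequencesDistance(trueSeq, predSeq[:-1]) + len(p),
--                           sequencesDistance(trueSeq[:-1], predSeq[:-1]) + cost])
--     return cache[seqsStr]
-- ===== SOURCE B (Python) =====
-- def sequencesDistance(trueSeq, predSeq):
--     # Bottom-up DP over prefixes, one row at a time: prev[j] = distance between
--     # the first i instants of trueSeq and the first j instants of predSeq.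
--     prev = [0]
--     for inst in predSeq:
--         prev.append(prev[-1] + len(inst))
--     for ti in trueSeq:
--         t = set(ti)
--         cur = [prev[0] + len(ti)]
--         for pj, diag, up in zip(predSeq, prev, prev[1:]):
--             p = set(pj)
--             cost = len(t - p) + len(p - t)
--             cur.append(min(cur[-1] + len(p), up + len(t), diag + cost))
--         prev = cur
--     return prev[-1]
-- ===== Notes on version B (the rewrite author's own statement) =====
-- stated objective: faster
-- what changed: Replaces A's top-down recursion (memoized in a global dict keyed by str() of the sliced lists, so every node rebuilds list slices and string keys) with a bottom-up rolling-row DP over prefixes in one pass.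
import Mathlib
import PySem

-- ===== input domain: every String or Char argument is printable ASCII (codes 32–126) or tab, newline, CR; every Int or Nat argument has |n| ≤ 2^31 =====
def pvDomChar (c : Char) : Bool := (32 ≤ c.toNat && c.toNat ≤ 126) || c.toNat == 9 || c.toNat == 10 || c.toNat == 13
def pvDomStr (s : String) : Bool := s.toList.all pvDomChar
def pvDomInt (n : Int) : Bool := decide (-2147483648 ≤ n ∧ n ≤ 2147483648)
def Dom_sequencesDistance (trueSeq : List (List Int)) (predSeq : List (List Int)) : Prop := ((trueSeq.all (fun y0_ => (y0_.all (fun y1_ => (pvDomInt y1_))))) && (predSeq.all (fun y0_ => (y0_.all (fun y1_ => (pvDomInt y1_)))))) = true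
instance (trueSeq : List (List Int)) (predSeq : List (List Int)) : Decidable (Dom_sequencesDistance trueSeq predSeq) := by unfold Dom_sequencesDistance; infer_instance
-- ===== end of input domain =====

-- B replaces A's memoized top-down recursion (global dict keyed by str() of list slices)
-- by a bottom-up rolling-row DP over prefixes; objective: faster. A's `cache` is pure
-- memoization (value-identical), so the port is the bare recursion.

-- ===== PORT A =====
-- `trueSeq[:-1]` on a nonempty list is `List.dropLast`; `trueSeq[-1]` is `getLast?.getD []`
-- (in the branch where it is evaluated both lists are nonempty, so the `getD` default is dead).
def sequencesDistance (trueSeq : List (List Int)) (predSeq : List (List Int)) : Int :=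
  if trueSeq.length < predSeq.length then
    sequencesDistance predSeq trueSeq
  else if predSeq.length = 0 then
    (((trueSeq.map List.length).sum : Nat) : Int)   -- len of the flattened label list (raw count)
  else
    let t := PySem.Set.ofList (trueSeq.getLast?.getD [])
    let p := PySem.Set.ofList (predSeq.getLast?.getD [])
    let cost : Int := (((PySem.Set.diff t p).length + (PySem.Set.diff p t).length : Nat) : Int)
    min (sequencesDistance trueSeq.dropLast predSeq + ((t.length : Nat) : Int))
      (min (sequencesDistance trueSeq predSeq.dropLast + ((p.length : Nat) : Int))
        (sequencesDistance trueSeq.dropLast predSeq.dropLast + cost))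
termination_by (trueSeq.length + predSeq.length, predSeq.length)
decreasing_by
  · exact Prod.Lex.right' _ (by omega) (by omega)
  · apply Prod.Lex.left; simp [List.length_dropLast]; omega
  · apply Prod.Lex.left; simp [List.length_dropLast]; omega
  · apply Prod.Lex.left; simp [List.length_dropLast]; omega

-- ===== PORT B =====
-- `prev[1:]` is `List.tail`, `prev[-1]`/`prev[0]` are `getLast?.getD 0`/`head?.getD 0`
-- (the rows are never empty, so the defaults are dead); 3-way zip is nested `List.zip`.
def sequencesDistance_alt (trueSeq : List (List Int)) (predSeq : List (List Int)) : Int :=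
  let row0 : List Int :=
    predSeq.foldl (fun prev inst => prev ++ [(prev.getLast?.getD 0) + ((inst.length : Nat) : Int)]) [0]
  let last : List Int :=
    trueSeq.foldl (fun prev ti =>
      let t := PySem.Set.ofList ti
      (predSeq.zip (prev.zip prev.tail)).foldl
        (fun cur x =>
          let p := PySem.Set.ofList x.1
          let cost : Int := (((PySem.Set.diff t p).length + (PySem.Set.diff p t).length : Nat) : Int)
          cur ++ [min ((cur.getLast?.getD 0) + ((p.length : Nat) : Int))
                    (min (x.2.2 + ((t.length : Nat) : Int)) (x.2.1 + cost))])
        [(prev.head?.getD 0) + ((ti.length : Nat) : Int)]) row0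
  last.getLast?.getD 0

-- ===== PRECONDITION & SPEC =====
def Spec_sequencesDistance (trueSeq : List (List Int)) (predSeq : List (List Int)) (out : Int) : Prop := out = sequencesDistance_alt trueSeq predSeq
instance (trueSeq : List (List Int)) (predSeq : List (List Int)) (out : Int) : Decidable (Spec_sequencesDistance trueSeq predSeq out) := by unfold Spec_sequencesDistance; infer_instance

-- ===== CLAIM (what is proved, stated in full; the proofs are below) =====
def Claim_equal_sequencesDistance : Prop := ∀ (trueSeq : List (List Int)) (predSeq : List (List Int)), Dom_sequencesDistance trueSeq predSeq → Spec_sequencesDistance trueSeq predSeq (sequencesDistance trueSeq predSeq)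

-- ===== LEMMAS AND PROOFS =====

-- abbreviations used only by the proofs
def pvCost (t p : List Int) : Int :=
  (((PySem.Set.diff (PySem.Set.ofList t) (PySem.Set.ofList p)).length
    + (PySem.Set.diff (PySem.Set.ofList p) (PySem.Set.ofList t)).length : Nat) : Int)

def pvSetLen (t : List Int) : Int := (((PySem.Set.ofList t).length : Nat) : Int)

theorem F_swap (x y : List (List Int)) (h : x.length < y.length) :
    sequencesDistance x y = sequencesDistance y x := by
  conv_lhs => rw [sequencesDistance]
  simp [h]

theorem F_symm (x y : List (List Int)) : sequencesDistance x y = sequencesDistance y x := by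
  rcases lt_trichotomy x.length y.length with h | h | h
  · rw [F_swap x y h]
  · by_cases hy : y.length = 0
    · have hx : x = [] := by apply List.length_eq_zero_iff.mp; omega
      have hy' : y = [] := List.length_eq_zero_iff.mp hy
      subst hx hy'; rfl
    · rw [sequencesDistance]
      conv_rhs => rw [sequencesDistance]
      have h1 : ¬ x.length < y.length := by omega
      have h2 : ¬ y.length < x.length := by omega
      have hx : ¬ x.length = 0 := by omega
      simp only [h1, h2, hy, hx, if_false]
      have e1 := F_symm x.dropLast y
      have e2 := F_symm x y.dropLast
      have e3 := F_symm x.dropLast y.dropLast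
      rw [e1, e2, e3]
      omega
  · rw [F_swap y x h]
termination_by x.length + y.length
decreasing_by
  · simp [List.length_dropLast]; omega
  · simp [List.length_dropLast]; omega
  · simp [List.length_dropLast]; omega

theorem F_app (a : List (List Int)) (t : List Int) (b : List (List Int)) (p : List Int) :
    sequencesDistance (a ++ [t]) (b ++ [p])
      = min (sequencesDistance (a ++ [t]) b + pvSetLen p)
          (min (sequencesDistance a (b ++ [p]) + pvSetLen t)
            (sequencesDistance a b + pvCost t p)) := by
  by_cases h : (a ++ [t]).length < (b ++ [p]).length
  · rw [F_swap _ _ h, sequencesDistance]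
    have h2 : ¬ (b ++ [p]).length < (a ++ [t]).length := by omega
    have h3 : ¬ (a ++ [t]).length = 0 := by simp
    simp only [h2, h3, if_false, List.getLast?_concat, Option.getD_some, List.dropLast_concat]
    rw [F_symm b (a ++ [t]), F_symm (b ++ [p]) a, F_symm b a]
    unfold pvCost pvSetLen
    push_cast
    omega
  · rw [sequencesDistance]
    have h3 : ¬ (b ++ [p]).length = 0 := by simp
    simp only [h, h3, if_false, List.getLast?_concat, Option.getD_some, List.dropLast_concat]
    unfold pvCost pvSetLen
    push_cast
    omega

theorem F_nil_right (x : List (List Int)) :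
    sequencesDistance x [] = (((x.map List.length).sum : Nat) : Int) := by
  rw [sequencesDistance]; simp

theorem F_nil_left (y : List (List Int)) :
    sequencesDistance [] y = (((y.map List.length).sum : Nat) : Int) := by
  rw [F_symm, F_nil_right]

theorem F_concat_nil (a : List (List Int)) (t : List Int) :
    sequencesDistance (a ++ [t]) [] = sequencesDistance a [] + ((t.length : Nat) : Int) := by
  rw [F_nil_right, F_nil_right]; simp

theorem F_nil_concat (b : List (List Int)) (p : List Int) :
    sequencesDistance [] (b ++ [p]) = sequencesDistance [] b + ((p.length : Nat) : Int) := by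
  rw [F_nil_left, F_nil_left]; simp

def Rb (a b : List (List Int)) : List (List Int) → List Int
  | [] => [sequencesDistance a b]
  | p :: ys => sequencesDistance a b :: Rb a (b ++ [p]) ys

theorem Rb_eq_head_tail (a b : List (List Int)) (ys : List (List Int)) :
    Rb a b ys = sequencesDistance a b :: (Rb a b ys).tail := by
  cases ys <;> rfl

theorem Rb_getLast (a : List (List Int)) (ys b : List (List Int)) :
    (Rb a b ys).getLast?.getD 0 = sequencesDistance a (b ++ ys) := by
  induction ys generalizing b with
  | nil => simp [Rb]
  | cons p ys ih =>
    rw [Rb, Rb_eq_head_tail a (b ++ [p]) ys]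
    simp only [List.getLast?_cons_cons]
    rw [← Rb_eq_head_tail, ih]
    simp

theorem row0_fold (ys : List (List Int)) : ∀ (b : List (List Int)) (acc : List Int),
    acc.getLast?.getD 0 = sequencesDistance [] b →
    ys.foldl (fun prev inst => prev ++ [(prev.getLast?.getD 0) + ((inst.length : Nat) : Int)]) acc
      = acc ++ (Rb [] b ys).tail := by
  induction ys with
  | nil => intro b acc _; simp [Rb]
  | cons p ys ih =>
    intro b acc hacc
    rw [List.foldl_cons, hacc, ← F_nil_concat b p,
      ih (b ++ [p]) _ (by simp),
      Rb, Rb_eq_head_tail [] (b ++ [p]) ys]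
    simp

theorem inner_fold (a : List (List Int)) (ti : List Int) :
    ∀ (ys b : List (List Int)) (acc : List Int),
    acc.getLast?.getD 0 = sequencesDistance (a ++ [ti]) b →
    (ys.zip ((Rb a b ys).zip ((Rb a b ys).tail))).foldl
      (fun cur x =>
        cur ++ [min ((cur.getLast?.getD 0) + (((PySem.Set.ofList x.1).length : Nat) : Int))
                  (min (x.2.2 + (((PySem.Set.ofList ti).length : Nat) : Int))
                    (x.2.1 + (((PySem.Set.diff (PySem.Set.ofList ti) (PySem.Set.ofList x.1)).length
                               + (PySem.Set.diff (PySem.Set.ofList x.1) (PySem.Set.ofList ti)).length : Nat) : Int)))])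
      acc
      = acc ++ (Rb (a ++ [ti]) b ys).tail := by
  intro ys
  induction ys with
  | nil => intro b acc _; simp [Rb]
  | cons p ys ih =>
    intro b acc hacc
    rw [Rb, Rb_eq_head_tail a (b ++ [p]) ys]
    simp only [List.tail_cons, List.zip_cons_cons, List.foldl_cons]
    rw [← Rb_eq_head_tail a (b ++ [p]) ys, hacc]
    have hstep : min (sequencesDistance (a ++ [ti]) b + (((PySem.Set.ofList p).length : Nat) : Int))
        (min (sequencesDistance a (b ++ [p]) + (((PySem.Set.ofList ti).length : Nat) : Int))
          (sequencesDistance a b + (((PySem.Set.diff (PySem.Set.ofList ti) (PySem.Set.ofList p)).length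
            + (PySem.Set.diff (PySem.Set.ofList p) (PySem.Set.ofList ti)).length : Nat) : Int)))
        = sequencesDistance (a ++ [ti]) (b ++ [p]) := by
      rw [F_app a ti b p]; unfold pvCost pvSetLen; push_cast; omega
    rw [hstep, ih (b ++ [p]) _ (by simp)]
    simp only [List.append_assoc, List.singleton_append, List.append_cancel_left_eq]
    exact (Rb_eq_head_tail (a ++ [ti]) (b ++ [p]) ys).symm

theorem outer_fold (y : List (List Int)) : ∀ (xs a : List (List Int)),
    xs.foldl (fun prev ti =>
      (y.zip (prev.zip prev.tail)).foldl
        (fun cur x =>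
          cur ++ [min ((cur.getLast?.getD 0) + (((PySem.Set.ofList x.1).length : Nat) : Int))
                    (min (x.2.2 + (((PySem.Set.ofList ti).length : Nat) : Int))
                      (x.2.1 + (((PySem.Set.diff (PySem.Set.ofList ti) (PySem.Set.ofList x.1)).length
                                 + (PySem.Set.diff (PySem.Set.ofList x.1) (PySem.Set.ofList ti)).length : Nat) : Int)))])
        [(prev.head?.getD 0) + ((ti.length : Nat) : Int)]) (Rb a [] y)
      = Rb (a ++ xs) [] y := by
  intro xs
  induction xs with
  | nil => intro a; simp
  | cons t xs ih =>
    intro a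
    rw [List.foldl_cons]
    have hhead : (Rb a [] y).head?.getD 0 = sequencesDistance a [] := by
      rw [Rb_eq_head_tail a [] y]; simp
    have hstep : (y.zip ((Rb a [] y).zip (Rb a [] y).tail)).foldl
        (fun cur x =>
          cur ++ [min ((cur.getLast?.getD 0) + (((PySem.Set.ofList x.1).length : Nat) : Int))
                    (min (x.2.2 + (((PySem.Set.ofList t).length : Nat) : Int))
                      (x.2.1 + (((PySem.Set.diff (PySem.Set.ofList t) (PySem.Set.ofList x.1)).length
                                 + (PySem.Set.diff (PySem.Set.ofList x.1) (PySem.Set.ofList t)).length : Nat) : Int)))])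
        [((Rb a [] y).head?.getD 0) + ((t.length : Nat) : Int)] = Rb (a ++ [t]) [] y := by
      rw [hhead, ← F_concat_nil a t,
        inner_fold a t y [] _ (by simp), List.singleton_append,
        ← Rb_eq_head_tail (a ++ [t]) [] y]
    rw [hstep, ih (a ++ [t])]
    simp

theorem alt_eq (x y : List (List Int)) :
    (fun trueSeq predSeq =>
      let row0 : List Int :=
        predSeq.foldl (fun prev inst => prev ++ [(prev.getLast?.getD 0) + ((inst.length : Nat) : Int)]) [0]
      let last : List Int :=
        trueSeq.foldl (fun prev ti =>
          let t := PySem.Set.ofList ti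
          (predSeq.zip (prev.zip prev.tail)).foldl
            (fun cur xx =>
              let p := PySem.Set.ofList xx.1
              let cost : Int := (((PySem.Set.diff t p).length + (PySem.Set.diff p t).length : Nat) : Int)
              cur ++ [min ((cur.getLast?.getD 0) + ((p.length : Nat) : Int))
                        (min (xx.2.2 + ((t.length : Nat) : Int)) (xx.2.1 + cost))])
            [(prev.head?.getD 0) + ((ti.length : Nat) : Int)]) row0
      last.getLast?.getD 0 : List (List Int) → List (List Int) → Int) x y = sequencesDistance x y := by
  show (x.foldl (fun prev ti =>
      (y.zip (prev.zip prev.tail)).foldl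
        (fun cur xx =>
          cur ++ [min ((cur.getLast?.getD 0) + (((PySem.Set.ofList xx.1).length : Nat) : Int))
                    (min (xx.2.2 + (((PySem.Set.ofList ti).length : Nat) : Int))
                      (xx.2.1 + (((PySem.Set.diff (PySem.Set.ofList ti) (PySem.Set.ofList xx.1)).length
                                 + (PySem.Set.diff (PySem.Set.ofList xx.1) (PySem.Set.ofList ti)).length : Nat) : Int)))])
        [(prev.head?.getD 0) + ((ti.length : Nat) : Int)])
      (y.foldl (fun prev inst => prev ++ [(prev.getLast?.getD 0) + ((inst.length : Nat) : Int)]) [0])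
    ).getLast?.getD 0 = sequencesDistance x y
  rw [row0_fold y [] [0] (by rw [sequencesDistance]; simp),
    show ([(0:Int)] ++ (Rb [] [] y).tail) = Rb [] [] y from by
      rw [Rb_eq_head_tail [] [] y]; rw [show sequencesDistance [] [] = 0 from by rw [sequencesDistance]; simp]; rfl,
    outer_fold y x [], Rb_getLast]
  simp

theorem alt_eq_main (x y : List (List Int)) :
    sequencesDistance_alt x y = sequencesDistance x y := alt_eq x y

-- ===== VERDICT (by name: the statement is the Claim_ definition above) =====
theorem sequencesDistance_spec : Claim_equal_sequencesDistance := by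
  intro x y _
  show sequencesDistance x y = sequencesDistance_alt x y
  exact (alt_eq_main x y).symm
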